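-- pv_equiv track=rewrite | github.com/leo1010077/NetAugOSA | dataloader/dataset_npy_ViT_padding_aug.py | index_2
-- ===== SOURCE A (Python) =====
-- def index_2(list, long):
--     r0 = 0
--     r1 = list[0][0]
--     out_list = []
--     out_list.append([r0, r1])
--     length = len(list)
--     for ind, i in enumerate(list):
--         out_list.append([i[0], i[-1]])
--         if ind + 1 < length:
--             out_list.append([i[-1], list[ind+1][0]])
--     out_list.append([list[-1][-1], long])
--     return out_list
-- ===== SOURCE B (Python) =====
-- def index_2(list, long):
--     # Collect all boundary points in order, then pair consecutive points.
--     pts = [0]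
--     for seg in list:
--         pts.append(seg[0])
--         pts.append(seg[-1])
--     pts.append(long)
--     return [[pts[i], pts[i + 1]] for i in range(len(pts) - 1)]
-- ===== Notes on version B (the rewrite author's own statement) =====
-- stated objective: simpler
-- what changed: B first builds a flat list of boundary points (0, each segment's first and last element, long) and then emits the intervals by uniformly pairing consecutive points, instead of A's interleaved appends with an index lookahead into list[ind+1]; Pre_ excludes inputs on which A raises IndexError (empty outer list or an empty inner segment).
-- crash fix: On the empty outer list A raises IndexError at list[0][0] while B naturally returns [[0, long]]. — e.g. on index_2([], 5): A raises IndexError, B returns [[0, 5]]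
import Mathlib
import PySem

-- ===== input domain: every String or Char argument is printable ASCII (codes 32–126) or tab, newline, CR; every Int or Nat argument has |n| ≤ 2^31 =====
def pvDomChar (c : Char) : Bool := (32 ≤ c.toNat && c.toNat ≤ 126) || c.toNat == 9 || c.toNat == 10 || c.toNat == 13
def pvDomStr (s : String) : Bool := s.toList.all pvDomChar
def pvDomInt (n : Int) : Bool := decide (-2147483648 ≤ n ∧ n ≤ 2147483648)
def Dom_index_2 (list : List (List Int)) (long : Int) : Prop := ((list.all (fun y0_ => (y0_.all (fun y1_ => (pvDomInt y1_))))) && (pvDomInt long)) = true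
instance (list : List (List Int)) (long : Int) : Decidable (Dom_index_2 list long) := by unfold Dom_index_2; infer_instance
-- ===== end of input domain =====

-- B builds the flat list of boundary points and pairs consecutive points; same O(n) cost, plainer shape.

-- ===== PORT A =====
def index_2 (list : List (List Int)) (long : Int) : List (List Int) :=
  let r0 : Int := 0
  let r1 : Int := (PySem.List.pyGet? ((PySem.List.pyGet? list 0).getD []) 0).getD 0
  let out_list : List (List Int) := []
  let out_list := out_list ++ [[r0, r1]]
  let length : Int := (list.length : Int)
  let out_list := (PySem.List.enumerate list 0).foldl (fun acc p =>
    let ind := p.1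
    let i := p.2
    let acc := acc ++ [[(PySem.List.pyGet? i 0).getD 0, (PySem.List.pyGet? i (-1)).getD 0]]
    if ind + 1 < length then
      acc ++ [[(PySem.List.pyGet? i (-1)).getD 0,
               (PySem.List.pyGet? ((PySem.List.pyGet? list (ind + 1)).getD []) 0).getD 0]]
    else acc) out_list
  out_list ++ [[(PySem.List.pyGet? ((PySem.List.pyGet? list (-1)).getD []) (-1)).getD 0, long]]

-- ===== PORT B =====
def index_2_alt (list : List (List Int)) (long : Int) : List (List Int) :=
  let pts : List Int :=
    [0] ++ list.flatMap (fun seg => [(PySem.List.pyGet? seg 0).getD 0, (PySem.List.pyGet? seg (-1)).getD 0]) ++ [long]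
  (List.range (pts.length - 1)).map (fun i => [pts.getD i 0, pts.getD (i + 1) 0])

-- ===== PRECONDITION & SPEC =====
-- Pre_ excludes exactly the inputs on which Python A raises IndexError: an empty outer list (list[0]) or an empty inner segment (i[0]).
def Pre_index_2 (list : List (List Int)) (long : Int) : Prop :=
  list ≠ [] ∧ ∀ s ∈ list, s ≠ []
instance (list : List (List Int)) (long : Int) : Decidable (Pre_index_2 list long) := by unfold Pre_index_2; infer_instance

def pvWitness_index_2 : List (List Int) × Int := ([[1, 2], [4, 6]], 10)

-- On the empty outer list A raises IndexError at list[0][0] while B naturally returns [[0, long]].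
def Raises_index_2 (list : List (List Int)) (long : Int) : Prop := list = []
instance (list : List (List Int)) (long : Int) : Decidable (Raises_index_2 list long) := by unfold Raises_index_2; infer_instance
def pvRaiseWitness_index_2 : List (List Int) × Int := ([], 5)
def pvRaiseWitnessOut_index_2 : List (List Int) := [[0, 5]]

def Spec_index_2 (list : List (List Int)) (long : Int) (out : List (List Int)) : Prop := out = index_2_alt list long
instance (list : List (List Int)) (long : Int) (out : List (List Int)) : Decidable (Spec_index_2 list long out) := by unfold Spec_index_2; infer_instance

-- ===== CLAIM (what is proved, stated in full; the proofs are below) =====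
def Claim_equal_index_2 : Prop := ∀ (list : List (List Int)) (long : Int), Dom_index_2 list long → Pre_index_2 list long → Spec_index_2 list long (index_2 list long)
def Claim_raises_index_2 : Prop := (∀ (list : List (List Int)) (long : Int), Dom_index_2 list long → Raises_index_2 list long → ¬ Pre_index_2 list long) ∧ (Dom_index_2 (pvRaiseWitness_index_2.1) (pvRaiseWitness_index_2.2) ∧ Raises_index_2 (pvRaiseWitness_index_2.1) (pvRaiseWitness_index_2.2) ∧ index_2_alt (pvRaiseWitness_index_2.1) (pvRaiseWitness_index_2.2) = pvRaiseWitnessOut_index_2)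

-- ===== LEMMAS AND PROOFS =====

-- first / last element of a segment, as both ports read them
def hA (s : List Int) : Int := (PySem.List.pyGet? s 0).getD 0
def lA (s : List Int) : Int := (PySem.List.pyGet? s (-1)).getD 0

-- the common interval chain, after the initial [0, first] pair
def chainA : List (List Int) → Int → List (List Int)
  | [], _ => []
  | [s], long => [[hA s, lA s], [lA s, long]]
  | s :: t :: r, long => [hA s, lA s] :: [lA s, hA t] :: chainA (t :: r) long

-- consecutive pairs of a point list
def adjPairs : List Int → List (List Int)
  | x :: y :: r => [x, y] :: adjPairs (y :: r)
  | _ => []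

theorem pairs_map_eq (pts : List Int) :
    (List.range (pts.length - 1)).map (fun i => [pts.getD i 0, pts.getD (i + 1) 0]) = adjPairs pts := by
  induction pts with
  | nil => simp [adjPairs]
  | cons x t ih =>
    cases t with
    | nil => simp [adjPairs]
    | cons y r =>
      have hlen : (x :: y :: r).length - 1 = (y :: r).length - 1 + 1 := by simp
      rw [hlen, List.range_succ_eq_map, List.map_cons, List.map_map]
      rw [show adjPairs (x :: y :: r) = [x, y] :: adjPairs (y :: r) from rfl]
      refine congrArg₂ List.cons (by simp) ?_
      rw [← ih]
      apply List.map_congr_left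
      intro i _
      simp

theorem adjPairs_chain (long : Int) : ∀ (rest : List (List Int)) (s : List Int) (prev : Int),
    adjPairs (prev :: (s :: rest).flatMap (fun seg => [hA seg, lA seg]) ++ [long])
      = [prev, hA s] :: chainA (s :: rest) long := by
  intro rest
  induction rest with
  | nil => intro s prev; simp [adjPairs, chainA]
  | cons t r ih =>
    intro s prev
    simp only [List.flatMap_cons, List.cons_append, List.nil_append]
    rw [show adjPairs (prev :: hA s :: lA s :: hA t :: lA t :: (List.flatMap (fun seg => [hA seg, lA seg]) r ++ [long]))
        = [prev, hA s] :: [hA s, lA s] :: adjPairs (lA s :: hA t :: lA t :: (List.flatMap (fun seg => [hA seg, lA seg]) r ++ [long])) from rfl]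
    have hih := ih t (lA s)
    simp only [List.flatMap_cons, List.cons_append, List.nil_append] at hih
    rw [hih]
    rfl

theorem loopA (orig : List (List Int)) (long : Int) :
    ∀ (suf pre : List (List Int)), pre ++ suf = orig → suf ≠ [] →
    (PySem.List.enumerate suf (pre.length : Int)).flatMap
      (fun p => [[hA p.2, lA p.2]] ++
        (if p.1 + 1 < (orig.length : Int) then
          [[lA p.2, hA ((PySem.List.pyGet? orig (p.1 + 1)).getD [])]] else []))
      ++ [[lA (suf.getLast?.getD []), long]] = chainA suf long := by
  intro suf
  induction suf with
  | nil => intro pre _ h; exact absurd rfl h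
  | cons s rest ih =>
    intro pre horig _
    rw [PySem.List.enumerate_cons]
    cases rest with
    | nil =>
      have hlen : orig.length = pre.length + 1 := by rw [← horig]; simp
      have hcond : ¬ ((pre.length : Int) + 1 < (orig.length : Int)) := by
        rw [hlen]; push_cast; omega
      simp [hcond, chainA]
    | cons t r =>
      have hlen : orig.length = pre.length + 2 + r.length := by rw [← horig]; simp; omega
      have hcond : (pre.length : Int) + 1 < (orig.length : Int) := by
        rw [hlen]; push_cast; omega
      have hget : PySem.List.pyGet? orig ((pre.length : Int) + 1) = some t := by
        have h1 : orig = (pre ++ [s]) ++ t :: r := by rw [← horig]; simp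
        have h2 : ((pre.length : Int) + 1) = (((pre ++ [s]).length : Nat) : Int) := by
          simp
        rw [h1, h2, PySem.List.pyGet?_append_length]
      have ihres := ih (pre ++ [s]) (by rw [← horig]; simp) (by simp)
      simp only [List.length_append, List.length_cons, List.length_nil] at ihres
      push_cast at ihres
      simp only [List.flatMap_cons, hcond, if_pos, hget, Option.getD_some,
        List.cons_append, List.nil_append] at ihres ⊢
      have hlast : (s :: t :: r).getLast?.getD [] = (t :: r).getLast?.getD [] := by
        rw [List.getLast?_cons_cons]
      rw [hlast]
      rw [ihres]
      simp [chainA]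

theorem index_2_eq_chain (list : List (List Int)) (long : Int) (h : list ≠ []) :
    index_2 list long = [0, hA list.head!] :: chainA list long := by
  obtain ⟨s, rest, rfl⟩ := List.exists_cons_of_ne_nil h
  show (List.nil ++ [[(0:Int), (PySem.List.pyGet? ((PySem.List.pyGet? (s :: rest) 0).getD []) 0).getD 0]] |>
    (PySem.List.enumerate (s :: rest) 0).foldl (fun acc p =>
      let ind := p.1
      let i := p.2
      let acc := acc ++ [[(PySem.List.pyGet? i 0).getD 0, (PySem.List.pyGet? i (-1)).getD 0]]
      if ind + 1 < ((s :: rest).length : Int) then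
        acc ++ [[(PySem.List.pyGet? i (-1)).getD 0,
                 (PySem.List.pyGet? ((PySem.List.pyGet? (s :: rest) (ind + 1)).getD []) 0).getD 0]]
      else acc))
    ++ [[(PySem.List.pyGet? ((PySem.List.pyGet? (s :: rest) (-1)).getD []) (-1)).getD 0, long]]
    = [0, hA (s :: rest).head!] :: chainA (s :: rest) long
  have hbody : (fun (acc : List (List Int)) (p : Int × List Int) =>
      let ind := p.1
      let i := p.2
      let acc := acc ++ [[(PySem.List.pyGet? i 0).getD 0, (PySem.List.pyGet? i (-1)).getD 0]]
      if ind + 1 < ((s :: rest).length : Int) then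
        acc ++ [[(PySem.List.pyGet? i (-1)).getD 0,
                 (PySem.List.pyGet? ((PySem.List.pyGet? (s :: rest) (ind + 1)).getD []) 0).getD 0]]
      else acc)
      = fun acc p => acc ++
        ([[hA p.2, lA p.2]] ++
          (if p.1 + 1 < (((s :: rest) : List (List Int)).length : Int) then
            [[lA p.2, hA ((PySem.List.pyGet? (s :: rest) (p.1 + 1)).getD [])]] else [])) := by
    funext acc p
    dsimp only
    split_ifs with hc <;> simp [hA, lA]
  rw [hbody, PySem.List.foldl_append_eq_flatMap]
  have hfirst : (PySem.List.pyGet? ((PySem.List.pyGet? (s :: rest) 0).getD []) 0).getD 0 = hA s := by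
    rw [PySem.List.pyGet?_zero_cons]; rfl
  have hlastseg : (PySem.List.pyGet? (s :: rest) (-1)).getD [] = (s :: rest).getLast?.getD [] := by
    rw [PySem.List.pyGet?_neg_one]
  have hloop := loopA (s :: rest) long (s :: rest) [] rfl (by simp)
  simp only [List.length_nil, Nat.cast_zero] at hloop
  rw [hfirst, hlastseg]
  have hrd : (PySem.List.pyGet? ((s :: rest).getLast?.getD []) (-1)).getD 0 = lA ((s :: rest).getLast?.getD []) := rfl
  rw [hrd]
  simp only [List.nil_append]
  rw [List.append_assoc, hloop]
  rfl

theorem index_2_alt_eq_chain (list : List (List Int)) (long : Int) (h : list ≠ []) :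
    index_2_alt list long = [0, hA list.head!] :: chainA list long := by
  obtain ⟨s, rest, rfl⟩ := List.exists_cons_of_ne_nil h
  show (List.range ((([(0:Int)] ++ (s :: rest).flatMap (fun seg => [(PySem.List.pyGet? seg 0).getD 0, (PySem.List.pyGet? seg (-1)).getD 0]) ++ [long]).length) - 1)).map
      (fun i => [([(0:Int)] ++ (s :: rest).flatMap (fun seg => [(PySem.List.pyGet? seg 0).getD 0, (PySem.List.pyGet? seg (-1)).getD 0]) ++ [long]).getD i 0,
                 ([(0:Int)] ++ (s :: rest).flatMap (fun seg => [(PySem.List.pyGet? seg 0).getD 0, (PySem.List.pyGet? seg (-1)).getD 0]) ++ [long]).getD (i + 1) 0])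
    = [0, hA (s :: rest).head!] :: chainA (s :: rest) long
  rw [pairs_map_eq]
  have hfn : (fun (seg : List Int) => [(PySem.List.pyGet? seg 0).getD 0, (PySem.List.pyGet? seg (-1)).getD 0]) = fun seg => [hA seg, lA seg] := rfl
  rw [hfn]
  have := adjPairs_chain long rest s 0
  simpa using this

-- ===== VERDICT (by name: the statement is the Claim_ definition above) =====
theorem index_2_spec : Claim_equal_index_2 := by
  intro list long _ hpre
  unfold Spec_index_2
  rw [index_2_eq_chain list long hpre.1, index_2_alt_eq_chain list long hpre.1]

@[simp] theorem index_2_raises : Claim_raises_index_2 := by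
  unfold Claim_raises_index_2
  constructor
  · intro list long _ hr hpre; exact hpre.1 hr
  · exact ⟨by decide, by decide, by decide⟩
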